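-- pv_equiv track=rewrite | github.com/abhicloud52/Weather-ETL-Pipline- | src/validators.py | validate_weather_record
-- ===== SOURCE A (Python) =====
-- def validate_weather_record(record: dict) -> bool:
--     req_keys = [
--         "city", "country", "timestamp",
--         "temperature", "humidity", "pressure", "wind_speed", "condition",
--     ]
--     for k in req_keys:
--         if k not in record:
--             return False
--     # basic range checks
--     if not (-80 <= record["temperature"] <= 60):
--         return False
--     if not (0 <= record["humidity"] <= 100):
--         return False
--     if not (800 <= record["pressure"] <= 1100):
--         return False
--     if record["wind_speed"] < 0:
--         return False
--     return True
-- ===== SOURCE B (Python) =====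
-- def validate_weather_record(record: dict) -> bool:
--     needed = {"city", "country", "timestamp", "temperature",
--               "humidity", "pressure", "wind_speed", "condition"}
--     hits = 0
--     for k, v in record.items():
--         if k not in needed:
--             continue
--         hits += 1
--         if k == "temperature" and not (-80 <= v <= 60):
--             return False
--         if k == "humidity" and not (0 <= v <= 100):
--             return False
--         if k == "pressure" and not (800 <= v <= 1100):
--             return False
--         if k == "wind_speed" and v < 0:
--             return False
--     return hits == 8
-- ===== Notes on version B (the rewrite author's own statement) =====
-- stated objective: alternative
-- what changed: Inverted the traversal: instead of probing the dict once per required key and then running a cascade of per-field lookups and range ifs, B makes a single streaming pass over the record's own items, counting hits of required keys and range-checking each value as it goes by, and decides presence by hits == 8 at the end.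
import Mathlib
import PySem

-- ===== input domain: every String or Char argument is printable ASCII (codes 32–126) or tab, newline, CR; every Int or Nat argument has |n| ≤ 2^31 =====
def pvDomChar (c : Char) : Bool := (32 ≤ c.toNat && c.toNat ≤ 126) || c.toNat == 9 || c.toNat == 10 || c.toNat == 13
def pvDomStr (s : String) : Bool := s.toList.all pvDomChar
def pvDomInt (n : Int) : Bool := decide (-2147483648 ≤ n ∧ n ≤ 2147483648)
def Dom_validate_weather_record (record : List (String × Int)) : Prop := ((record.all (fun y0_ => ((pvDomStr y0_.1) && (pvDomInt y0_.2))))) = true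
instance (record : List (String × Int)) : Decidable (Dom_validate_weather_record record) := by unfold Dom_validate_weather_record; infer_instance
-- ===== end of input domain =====

-- B inverts the traversal: one streaming pass over the record's own items (counting required-key
-- hits and range-checking each value as it streams by) instead of A's per-required-key dict probes
-- followed by a cascade of per-field lookups; objective: alternative (no speed claim).

-- ===== PORT A =====
-- the for-loop 'for k in req_keys: if k not in record: return False' as structural recursion
def pvKeysLoopA (d : PySem.Dict String Int) : List String → Bool
  | [] => true
  | k :: ks => if ¬ PySem.Dict.contains d k then false else pvKeysLoopA d ks

def validate_weather_record (record : List (String × Int)) : Bool :=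
  let d : PySem.Dict String Int := PySem.Dict.mk record
  let req_keys := ["city", "country", "timestamp",
                   "temperature", "humidity", "pressure", "wind_speed", "condition"]
  if ¬ pvKeysLoopA d req_keys then false
  else
    -- after the key loop every key is present, so Python's d[k] (KeyError impossible) is getD
    if ¬ (decide (-80 ≤ PySem.Dict.getD d "temperature" 0) && decide (PySem.Dict.getD d "temperature" 0 ≤ 60)) then false
    else if ¬ (decide (0 ≤ PySem.Dict.getD d "humidity" 0) && decide (PySem.Dict.getD d "humidity" 0 ≤ 100)) then false
    else if ¬ (decide (800 ≤ PySem.Dict.getD d "pressure" 0) && decide (PySem.Dict.getD d "pressure" 0 ≤ 1100)) then false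
    else if PySem.Dict.getD d "wind_speed" 0 < 0 then false
    else true

-- ===== PORT B =====
def pvNeededB : List String :=
  ["city", "country", "timestamp",
   "temperature", "humidity", "pressure", "wind_speed", "condition"]

-- the 'for k, v in record.items(): …' loop: under Pre_ the association list IS the dict's items
def pvLoopB : List (String × Int) → Int → Bool
  | [], hits => hits == 8
  | (k, v) :: rest, hits =>
    if k ∉ pvNeededB then pvLoopB rest hits       -- continue
    else
      let hits := hits + 1
      if k == "temperature" && ¬ (decide (-80 ≤ v) && decide (v ≤ 60)) then false
      else if k == "humidity" && ¬ (decide (0 ≤ v) && decide (v ≤ 100)) then false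
      else if k == "pressure" && ¬ (decide (800 ≤ v) && decide (v ≤ 1100)) then false
      else if k == "wind_speed" && decide (v < 0) then false
      else pvLoopB rest hits

def validate_weather_record_alt (record : List (String × Int)) : Bool :=
  pvLoopB record 0

-- ===== PRECONDITION & SPEC =====
-- Pre_ excludes association lists with duplicate keys: the Python parameter is a dict, which
-- cannot carry duplicate keys, and on such lists the encoding's first-vs-last meaning is unspecified.
def Pre_validate_weather_record (record : List (String × Int)) : Prop :=
  (record.map Prod.fst).Nodup
instance (record : List (String × Int)) : Decidable (Pre_validate_weather_record record) := by unfold Pre_validate_weather_record; infer_instance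

def pvWitness_validate_weather_record : (List (String × Int)) :=
  [("city", 1), ("country", 2), ("timestamp", 3), ("temperature", 20),
   ("humidity", 50), ("pressure", 1000), ("wind_speed", 5), ("condition", 4)]

def Spec_validate_weather_record (record : List (String × Int)) (out : Bool) : Prop := out = validate_weather_record_alt record
instance (record : List (String × Int)) (out : Bool) : Decidable (Spec_validate_weather_record record out) := by unfold Spec_validate_weather_record; infer_instance

-- ===== CLAIM (what is proved, stated in full; the proofs are below) =====
def Claim_equal_validate_weather_record : Prop := ∀ (record : List (String × Int)), Dom_validate_weather_record record → Pre_validate_weather_record record → Spec_validate_weather_record record (validate_weather_record record)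

-- ===== LEMMAS AND PROOFS =====
-- per-item range check, as a predicate (proof-side characterisation of B's in-loop tests)
def pvOk (k : String) (v : Int) : Bool :=
  if k = "temperature" then decide (-80 ≤ v) && decide (v ≤ 60)
  else if k = "humidity" then decide (0 ≤ v) && decide (v ≤ 100)
  else if k = "pressure" then decide (800 ≤ v) && decide (v ≤ 1100)
  else if k = "wind_speed" then decide (0 ≤ v)
  else true

theorem pvLoopB_eq (l : List (String × Int)) (hits : Int) :
    pvLoopB l hits =
      ((l.all fun p => pvOk p.1 p.2) &&
        decide (hits + (l.countP fun p => decide (p.1 ∈ pvNeededB)) = 8)) := by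
  induction l generalizing hits with
  | nil => by_cases h : hits = 8 <;> simp [pvLoopB, h]
  | cons p rest ih =>
    obtain ⟨k, v⟩ := p
    by_cases hk : k ∈ pvNeededB
    · have hsplit : pvLoopB ((k, v) :: rest) hits =
          if pvOk k v then pvLoopB rest (hits + 1) else false := by
        by_cases h1 : k = "temperature"
        · subst h1; simp [pvLoopB, pvOk, hk, ← decide_not]
        · by_cases h2 : k = "humidity"
          · subst h2; simp [pvLoopB, pvOk, hk, ← decide_not]
          · by_cases h3 : k = "pressure"
            · subst h3; simp [pvLoopB, pvOk, hk, ← decide_not]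
            · by_cases h4 : k = "wind_speed"
              · subst h4; simp [pvLoopB, pvOk, hk, ← decide_not]
              · simp [pvLoopB, pvOk, hk, h1, h2, h3, h4]
      rw [hsplit]
      cases ho : pvOk k v
      · simp [List.all_cons, ho]
      · simp only [if_true, ih, List.all_cons, ho, Bool.true_and, List.countP_cons, hk,
          decide_true, if_true]
        cases hall : rest.all fun p => pvOk p.1 p.2
        · simp
        · simp only [Bool.true_and]
          exact decide_eq_decide.mpr (by push_cast; omega)
    · have h1 : k ≠ "temperature" := fun e => hk (e ▸ (by decide))
      have h2 : k ≠ "humidity" := fun e => hk (e ▸ (by decide))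
      have h3 : k ≠ "pressure" := fun e => hk (e ▸ (by decide))
      have h4 : k ≠ "wind_speed" := fun e => hk (e ▸ (by decide))
      simp [pvLoopB, pvOk, hk, h1, h2, h3, h4, ih]

theorem pv_keysA_eq (d : PySem.Dict String Int) (ks : List String) :
    pvKeysLoopA d ks = !(ks.any (fun k => ¬ PySem.Dict.contains d k)) := by
  induction ks with
  | nil => rfl
  | cons k ks ih =>
    simp only [pvKeysLoopA, List.any_cons]
    by_cases h : PySem.Dict.contains d k <;> simp [h, ih]

theorem pvGetD_mem (record : List (String × Int)) (hnd : (record.map Prod.fst).Nodup)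
    {k : String} (hk : k ∈ record.map Prod.fst) :
    (k, (PySem.Dict.mk record).getD k 0) ∈ record := by
  obtain ⟨p, hp, rfl⟩ := List.mem_map.mp hk
  rw [PySem.Dict.getD_of_mem_items (PySem.Dict.mk record) (k := p.1) (v := p.2) hp hnd 0]
  simpa using hp

theorem pvGetD_of_mem (record : List (String × Int)) (hnd : (record.map Prod.fst).Nodup)
    {k : String} {v : Int} (hm : (k, v) ∈ record) :
    (PySem.Dict.mk record).getD k 0 = v :=
  PySem.Dict.getD_of_mem_items (PySem.Dict.mk record) hm hnd 0

theorem pvCount_iff (record : List (String × Int)) (hnd : (record.map Prod.fst).Nodup) :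
    (record.countP fun p => decide (p.1 ∈ pvNeededB)) = 8 ↔
      ∀ k ∈ pvNeededB, k ∈ record.map Prod.fst := by
  have hmc : (record.countP fun p => decide (p.1 ∈ pvNeededB))
      = ((record.map Prod.fst).filter (fun k => decide (k ∈ pvNeededB))).length := by
    rw [← List.countP_eq_length_filter, List.countP_map]; rfl
  set f := (record.map Prod.fst).filter (fun k => decide (k ∈ pvNeededB)) with hf
  have hfnd : f.Nodup := hnd.filter _
  have hfsubN : f.toFinset ⊆ pvNeededB.toFinset := by
    intro x hx
    simp only [List.mem_toFinset, hf, List.mem_filter, decide_eq_true_eq] at hx ⊢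
    exact hx.2
  have hNcard : pvNeededB.toFinset.card = 8 := by decide
  have hfcard : f.toFinset.card = f.length := List.toFinset_card_of_nodup hfnd
  rw [hmc]
  constructor
  · intro h8 k hk
    have heq : f.toFinset = pvNeededB.toFinset :=
      Finset.eq_of_subset_of_card_le hfsubN (by omega)
    have : k ∈ f.toFinset := by rw [heq]; simpa using hk
    simp only [List.mem_toFinset, hf, List.mem_filter] at this
    exact this.1
  · intro hall
    have hNsubf : pvNeededB.toFinset ⊆ f.toFinset := by
      intro x hx
      simp only [List.mem_toFinset] at hx
      simp only [List.mem_toFinset, hf, List.mem_filter, decide_eq_true_eq]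
      exact ⟨hall x hx, hx⟩
    have heq : f.toFinset = pvNeededB.toFinset := subset_antisymm hfsubN hNsubf
    rw [← hfcard, heq, hNcard]

theorem pvAll_iff (record : List (String × Int)) (hnd : (record.map Prod.fst).Nodup)
    (hp : ∀ k ∈ pvNeededB, k ∈ record.map Prod.fst) :
    ((record.all fun p => pvOk p.1 p.2) = true) ↔
      ((-80 ≤ (PySem.Dict.mk record).getD "temperature" 0 ∧ (PySem.Dict.mk record).getD "temperature" 0 ≤ 60) ∧
       (0 ≤ (PySem.Dict.mk record).getD "humidity" 0 ∧ (PySem.Dict.mk record).getD "humidity" 0 ≤ 100) ∧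
       (800 ≤ (PySem.Dict.mk record).getD "pressure" 0 ∧ (PySem.Dict.mk record).getD "pressure" 0 ≤ 1100) ∧
       0 ≤ (PySem.Dict.mk record).getD "wind_speed" 0) := by
  rw [List.all_eq_true]
  constructor
  · intro hall
    refine ⟨?_, ?_, ?_, ?_⟩ <;>
    · first
      | (have := hall _ (pvGetD_mem record hnd (hp "temperature" (by decide)))
         simp [pvOk] at this; omega)
      | (have := hall _ (pvGetD_mem record hnd (hp "humidity" (by decide)))
         simp [pvOk] at this; omega)
      | (have := hall _ (pvGetD_mem record hnd (hp "pressure" (by decide)))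
         simp [pvOk] at this; omega)
      | (have := hall _ (pvGetD_mem record hnd (hp "wind_speed" (by decide)))
         simp [pvOk] at this; omega)
  · rintro ⟨h1, h2, h3, h4⟩ ⟨k, v⟩ hm
    have hv := pvGetD_of_mem record hnd hm
    by_cases e1 : k = "temperature"
    · subst e1; rw [hv] at h1; simp [pvOk]; omega
    · by_cases e2 : k = "humidity"
      · subst e2; rw [hv] at h2; simp [pvOk]; omega
      · by_cases e3 : k = "pressure"
        · subst e3; rw [hv] at h3; simp [pvOk]; omega
        · by_cases e4 : k = "wind_speed"
          · subst e4; rw [hv] at h4; simp [pvOk]; omega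
          · simp [pvOk, e1, e2, e3, e4]

-- ===== VERDICT (by name: the statement is the Claim_ definition above) =====
theorem validate_weather_record_spec : Claim_equal_validate_weather_record := by
  intro record _ hnd
  unfold Spec_validate_weather_record validate_weather_record validate_weather_record_alt
  rw [pvLoopB_eq]
  have hkeys : (PySem.Dict.mk record).keys = record.map Prod.fst := rfl
  have hpres_iff : pvKeysLoopA (PySem.Dict.mk record)
      ["city", "country", "timestamp", "temperature", "humidity", "pressure", "wind_speed", "condition"] = true ↔
      ∀ k ∈ pvNeededB, k ∈ record.map Prod.fst := by
    rw [pv_keysA_eq]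
    simp [PySem.Dict.contains_eq_decide_mem_keys, hkeys, pvNeededB]
  by_cases hp : ∀ k ∈ pvNeededB, k ∈ record.map Prod.fst
  · have hloop : pvKeysLoopA (PySem.Dict.mk record)
        ["city", "country", "timestamp", "temperature", "humidity", "pressure", "wind_speed", "condition"] = true :=
      hpres_iff.mpr hp
    have hc : ((0 : Int) + (record.countP fun p => decide (p.1 ∈ pvNeededB)) = 8) := by
      have := (pvCount_iff record hnd).mpr hp
      omega
    simp only [hloop, not_true_eq_false, if_false, hc, decide_true, Bool.and_true]
    rw [Bool.eq_iff_iff, pvAll_iff record hnd hp]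
    split_ifs <;> simp_all
  · have hloop : ¬ (pvKeysLoopA (PySem.Dict.mk record)
        ["city", "country", "timestamp", "temperature", "humidity", "pressure", "wind_speed", "condition"] = true) :=
      fun h => hp (hpres_iff.mp h)
    have hc : ¬ ((0 : Int) + (record.countP fun p => decide (p.1 ∈ pvNeededB)) = 8) := by
      intro h
      exact hp ((pvCount_iff record hnd).mp (by omega))
    simp [Bool.not_eq_true] at hloop
    simp [hloop]
    intro _
    omega
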